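-- pv_equiv track=rewrite | github.com/ivanbratovic/aoc2020 | day15/day15.py | second_before
-- ===== SOURCE A (Python) =====
-- def second_before(l: list, i: int, num: int):
--     visited = False
--     for j in range(i, -1, -1):
--         if not visited and l[j] == num:
--             visited = True
--             continue
--         if visited and l[j] == num:
--             return j+1
--     return 0
-- ===== SOURCE B (Python) =====
-- def second_before(l: list, i: int, num: int):
--     positions = [j for j in range(i + 1) if l[j] == num]
--     if len(positions) >= 2:
--         return positions[-2] + 1
--     return 0
-- ===== Notes on version B (the rewrite author's own statement) =====
-- stated objective: simpler
-- what changed: Replaces A's backward early-terminating scan with a visited flag by a forward gather of all occurrence positions followed by picking the second-to-last one.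
import Mathlib
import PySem

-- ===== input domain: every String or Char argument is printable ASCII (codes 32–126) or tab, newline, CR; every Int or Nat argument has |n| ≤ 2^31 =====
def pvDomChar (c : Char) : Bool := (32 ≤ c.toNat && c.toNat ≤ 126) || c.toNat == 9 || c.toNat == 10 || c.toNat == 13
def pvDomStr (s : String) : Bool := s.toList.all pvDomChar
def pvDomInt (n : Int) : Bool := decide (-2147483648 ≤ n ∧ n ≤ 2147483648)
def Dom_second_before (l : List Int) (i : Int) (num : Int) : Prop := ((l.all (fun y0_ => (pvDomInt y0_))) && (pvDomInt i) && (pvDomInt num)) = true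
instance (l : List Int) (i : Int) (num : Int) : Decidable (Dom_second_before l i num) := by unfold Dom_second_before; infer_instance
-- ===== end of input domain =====

-- B replaces A's backward scan-with-flag by a forward gather of all occurrence
-- positions followed by picking the second-to-last one (objective: simpler).

-- ===== PORT A =====
-- the backward loop 'for j in range(i, -1, -1)' with the visited flag and early return
def sbGo (l : List Int) (num : Int) : Bool → List Int → Int
  | _, [] => 0
  | visited, j :: rest =>
    match PySem.List.pyGet? l j with
    | none => 0   -- IndexError in Python; excluded by Pre_second_before
    | some v =>
      if !visited && (v == num) then sbGo l num true rest
      else if visited && (v == num) then j + 1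
      else sbGo l num visited rest

def second_before (l : List Int) (i : Int) (num : Int) : Int :=
  sbGo l num false (PySem.List.pyRange i (-1) (-1))

-- ===== PORT B =====
def second_before_alt (l : List Int) (i : Int) (num : Int) : Int :=
  let positions := (PySem.List.pyRange 0 (i + 1) 1).filter
    (fun j => PySem.List.pyGet? l j == some num)
  if 2 ≤ positions.length then (PySem.List.pyGet? positions (-2)).getD 0 + 1 else 0

-- ===== PRECONDITION & SPEC =====
-- Pre_ excludes exactly the inputs where A raises IndexError (i ≥ len(l)); B raises there too.
def Pre_second_before (l : List Int) (i : Int) (num : Int) : Prop := i < (l.length : Int)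
instance (l : List Int) (i : Int) (num : Int) : Decidable (Pre_second_before l i num) := by
  unfold Pre_second_before; infer_instance

def pvWitness_second_before : List Int × Int × Int := ([3, 1, 3, 2, 3], 4, 3)

def Spec_second_before (l : List Int) (i : Int) (num : Int) (out : Int) : Prop := out = second_before_alt l i num
instance (l : List Int) (i : Int) (num : Int) (out : Int) : Decidable (Spec_second_before l i num out) := by unfold Spec_second_before; infer_instance

-- ===== CLAIM (what is proved, stated in full; the proofs are below) =====
def Claim_equal_second_before : Prop := ∀ (l : List Int) (i : Int) (num : Int), Dom_second_before l i num → Pre_second_before l i num → Spec_second_before l i num (second_before l i num)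

-- ===== LEMMAS AND PROOFS =====

-- after the first match is seen, A returns (first remaining match)+1, else 0
theorem sbGo_true (l : List Int) (num : Int) (js : List Int)
    (h : ∀ j ∈ js, (PySem.List.pyGet? l j).isSome) :
    sbGo l num true js =
      match js.filter (fun j => PySem.List.pyGet? l j == some num) with
      | b :: _ => b + 1
      | [] => 0 := by
  induction js with
  | nil => rfl
  | cons j rest ih =>
    have hj := h j (by simp)
    obtain ⟨v, hv⟩ := Option.isSome_iff_exists.mp hj
    by_cases hvn : v = num
    · subst hvn
      simp [sbGo, hv, List.filter]
    · have hb : (v == num) = false := by simp [hvn]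
      simp [sbGo, hv, hb, List.filter, ih (fun j hj => h j (by simp [hj]))]

-- before any match, A returns (second match)+1, else 0
theorem sbGo_false (l : List Int) (num : Int) (js : List Int)
    (h : ∀ j ∈ js, (PySem.List.pyGet? l j).isSome) :
    sbGo l num false js =
      match js.filter (fun j => PySem.List.pyGet? l j == some num) with
      | _ :: b :: _ => b + 1
      | _ => 0 := by
  induction js with
  | nil => rfl
  | cons j rest ih =>
    have hj := h j (by simp)
    obtain ⟨v, hv⟩ := Option.isSome_iff_exists.mp hj
    have hrest : ∀ j ∈ rest, (PySem.List.pyGet? l j).isSome := fun j hj => h j (by simp [hj])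
    by_cases hvn : v = num
    · subst hvn
      have hfc : (j :: rest).filter (fun j' => PySem.List.pyGet? l j' == some v)
          = j :: rest.filter (fun j' => PySem.List.pyGet? l j' == some v) :=
        List.filter_cons_of_pos (by simp [hv])
      rw [hfc]
      simp only [sbGo, hv, Bool.not_false, Bool.true_and, beq_self_eq_true, if_true]
      rw [sbGo_true l v rest hrest]
      rcases rest.filter (fun j' => PySem.List.pyGet? l j' == some v) with _ | ⟨b, t⟩ <;> rfl
    · have hb : (v == num) = false := by simp [hvn]
      simp [sbGo, hv, hb, List.filter, ih hrest]

-- picking the second element of the reverse = indexing [-2]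
theorem pick_reverse (ps : List Int) :
    (match ps.reverse with
     | _ :: b :: _ => b + 1
     | _ => (0 : Int)) =
    if 2 ≤ ps.length then (PySem.List.pyGet? ps (-2)).getD 0 + 1 else 0 := by
  rcases hr : ps.reverse with _ | ⟨a, _ | ⟨b, t⟩⟩
  · have : ps = [] := by simpa using congrArg List.reverse hr
    subst this; rfl
  · have : ps = [a] := by simpa using congrArg List.reverse hr
    subst this; rfl
  · have hps : ps = t.reverse ++ b :: [a] := by
      have := congrArg List.reverse hr
      simpa using this
    have hlen : 2 ≤ ps.length := by
      have := congrArg List.length hr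
      simp at this; omega
    rw [if_pos hlen]
    rw [PySem.List.pyGet?_neg_ofNat ps 2 (by norm_num) hlen]
    have hidx : ps.length - 2 = t.reverse.length := by
      have := congrArg List.length hr
      simp at this ⊢; omega
    rw [hidx, hps]
    simp

theorem second_before_eq (l : List Int) (i : Int) (num : Int)
    (hpre : Pre_second_before l i num) :
    second_before l i num = second_before_alt l i num := by
  unfold second_before second_before_alt
  rw [PySem.List.pyRange_neg_one_eq_reverse]
  norm_num
  have hall : ∀ j ∈ (PySem.List.pyRange 0 (i + 1) 1).reverse, (PySem.List.pyGet? l j).isSome := by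
    intro j hj
    rw [List.mem_reverse, PySem.List.mem_pyRange_one] at hj
    rw [PySem.List.pyGet?_eq_some_getElem l hj.1 (by unfold Pre_second_before at hpre; omega)]
    rfl
  rw [sbGo_false l num _ hall, List.filter_reverse]
  exact pick_reverse _

-- ===== VERDICT (by name: the statement is the Claim_ definition above) =====
theorem second_before_spec : Claim_equal_second_before := by
  intro l i num _ hpre
  unfold Spec_second_before
  exact second_before_eq l i num hpre
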